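-- pv_equiv track=rewrite | github.com/recsys06-letstravel/algorithm-study | LeetCode/SWEA_벽돌깨기_강신구.py | re_change
-- ===== SOURCE A (Python) =====
-- def re_change(graph):
--     graph=[list(k) for k in tuple(zip(*graph))]
--     for i in graph:
--         for j in range(len(i)):
--             if i[j]==0:
--                 i.pop(j)
--                 i.insert(0,0)
--     graph=[list(k) for k in tuple(zip(*graph))]
--     return graph
-- ===== SOURCE B (Python) =====
-- def re_change(graph):
--     new_cols = [(0,) * col.count(0) + tuple(filter(None, col)) for col in zip(*graph)]
--     return [list(row) for row in zip(*new_cols)]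
-- ===== Notes on version B (the rewrite author's own statement) =====
-- stated objective: alternative
-- what changed: A's per-column loop that pops each zero and re-inserts it at the front (a quadratic shuffle per column) is replaced by one stable partition per column: count the zeros, emit that many zeros, then the nonzero elements in order.
import Mathlib
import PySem

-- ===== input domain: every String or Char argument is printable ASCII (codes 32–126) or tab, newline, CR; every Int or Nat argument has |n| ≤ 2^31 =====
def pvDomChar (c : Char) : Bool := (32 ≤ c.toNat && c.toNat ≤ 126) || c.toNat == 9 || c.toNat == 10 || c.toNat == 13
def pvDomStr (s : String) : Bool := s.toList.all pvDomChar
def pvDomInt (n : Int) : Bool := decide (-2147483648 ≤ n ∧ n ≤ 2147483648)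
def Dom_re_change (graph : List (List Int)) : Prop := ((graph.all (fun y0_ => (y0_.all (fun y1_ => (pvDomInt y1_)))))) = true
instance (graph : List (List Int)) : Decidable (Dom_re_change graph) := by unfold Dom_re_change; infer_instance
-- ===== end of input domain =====

-- B replaces A's per-column pop/insert index loop by a single count-zeros +
-- stable-filter pass per column (objective: alternative algorithm, same measured cost).

-- ===== PORT A =====
-- Python's zip(*g) (transpose truncated to the shortest row); shared by both ports
-- since both Pythons call the builtin zip.  Exact: zip stops when any iterator is empty.
def pyZipT (g : List (List Int)) : List (List Int) :=
  if h : g = [] ∨ g.any (·.isEmpty) then [] else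
    g.map (fun r => r.headI) :: pyZipT (g.map (fun r => r.tail))
termination_by g.headI.length
decreasing_by
  rw [not_or] at h
  obtain ⟨h1, h2⟩ := h
  cases g with
  | nil => exact absurd rfl h1
  | cons r rs =>
    simp only [List.any_cons, Bool.or_eq_true, List.isEmpty_iff, not_or] at h2
    simp only [List.attach_cons, List.map_cons, List.headI_cons, List.length_tail]
    have : 0 < r.length := List.length_pos_iff.mpr h2.1
    omega

-- body of A's inner 'for j in range(len(i))' loop: i[j]==0 → i.pop(j); i.insert(0,0)
-- (pop(j) on an in-range index is eraseIdx; insert at 0 is cons; the 'none' branch is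
-- unreachable because j < len i throughout, exact where Python cannot raise)
def loopStepA (acc : List Int) (j : Nat) : List Int :=
  match PySem.List.pyGet? acc (j : Int) with
  | some v => if v = 0 then 0 :: acc.eraseIdx j else acc
  | none => acc

def innerA (l : List Int) : List Int := (List.range l.length).foldl loopStepA l

def re_change (graph : List (List Int)) : List (List Int) :=
  pyZipT ((pyZipT graph).map innerA)

-- ===== PORT B =====
-- (0,) * col.count(0) + tuple(filter(None, col))
-- (filter(None, ·) on ints keeps exactly the nonzero elements, in order)
def colFix (c : List Int) : List Int :=
  List.replicate (c.count 0) 0 ++ c.filter (fun v => v != 0)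

def re_change_alt (graph : List (List Int)) : List (List Int) :=
  pyZipT ((pyZipT graph).map colFix)

-- ===== PRECONDITION & SPEC =====
def Spec_re_change (graph : List (List Int)) (out : List (List Int)) : Prop := out = re_change_alt graph
instance (graph : List (List Int)) (out : List (List Int)) : Decidable (Spec_re_change graph out) := by unfold Spec_re_change; infer_instance

-- ===== CLAIM (what is proved, stated in full; the proofs are below) =====
def Claim_equal_re_change : Prop := ∀ (graph : List (List Int)), Dom_re_change graph → Spec_re_change graph (re_change graph)

-- ===== LEMMAS AND PROOFS =====

lemma count_add_filter_len (l : List Int) :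
    l.count 0 + (l.filter (fun v => v != 0)).length = l.length := by
  induction l with
  | nil => simp
  | cons x xs ih =>
    by_cases hx : x = 0 <;>
      simp [hx, ← ih] <;> omega

lemma cons_zero_replicate_append (n : Nat) (X : List Int) :
    (0 : Int) :: (List.replicate n (0 : Int) ++ X) = List.replicate n (0 : Int) ++ 0 :: X := by
  induction n with
  | zero => simp
  | succ n ih => simp [List.replicate_succ, ih]

-- loop invariant: after processing indices 0..j-1 the list is
-- (zeros of the first j elements) ++ (nonzeros of the first j elements, in order) ++ rest
lemma innerA_inv (l : List Int) (j : Nat) (hj : j ≤ l.length) :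
    (List.range j).foldl loopStepA l =
      List.replicate ((l.take j).count 0) 0 ++ (l.take j).filter (fun v => v != 0) ++ l.drop j := by
  induction j with
  | zero => simp
  | succ j ih =>
    have hj' : j ≤ l.length := Nat.le_of_succ_le hj
    have hjlt : j < l.length := hj
    rw [List.range_succ, List.foldl_append, ih hj']
    set Z := List.replicate ((l.take j).count 0) (0 : Int) with hZ
    set F := (l.take j).filter (fun v => v != 0) with hF
    have hlen : (Z ++ F).length = j := by
      rw [hZ, hF]
      simp only [List.length_append, List.length_replicate]
      have := count_add_filter_len (l.take j)
      rw [this]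
      exact List.length_take_of_le hj'
    have hdrop : l.drop j = l[j] :: l.drop (j + 1) := by
      rw [List.drop_eq_getElem_cons hjlt]
    have htake : l.take (j + 1) = l.take j ++ [l[j]] := by
      rw [List.take_add_one]
      simp [List.getElem?_eq_getElem hjlt]
    simp only [List.foldl_cons, List.foldl_nil]
    have hget : PySem.List.pyGet? (Z ++ F ++ l.drop j) ((j : Nat) : Int) = some l[j] := by
      rw [PySem.List.pyGet?_natCast, List.getElem?_append_right hlen.le, hlen,
        Nat.sub_self, hdrop]
      rfl
    rw [loopStepA, hget]
    by_cases h0 : l[j] = 0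
    · simp only [h0, if_pos]
      have herase : (Z ++ F ++ l.drop j).eraseIdx j = Z ++ F ++ l.drop (j + 1) := by
        rw [List.eraseIdx_eq_take_drop_succ]
        have ht : (Z ++ F ++ l.drop j).take j = Z ++ F := by
          rw [show j = (Z ++ F).length from hlen.symm]
          exact List.take_left
        have hd : (Z ++ F ++ l.drop j).drop (j + 1) = l.drop (j + 1) := by
          have hsplit : Z ++ F ++ l.drop j = (Z ++ F ++ [l[j]]) ++ l.drop (j + 1) := by
            rw [hdrop]; simp
          have hlen2 : (Z ++ F ++ [l[j]]).length = j + 1 := by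
            have h3 : Z.length + F.length = j := by simpa [List.length_append] using hlen
            simp only [List.length_append, List.length_cons, List.length_nil]
            omega
          rw [hsplit]
          conv_lhs => rw [← hlen2]
          simp
          have h3 : Z.length + F.length = j := by simpa [List.length_append] using hlen
          omega
        rw [ht, hd]
      rw [herase, htake, List.count_append, List.filter_append]
      have hc : List.count 0 [l[j]] = 1 := by simp [h0]
      have hf : List.filter (fun v => v != 0) [l[j]] = [] := by simp [h0]
      rw [hc, hf, List.append_nil, List.replicate_add]
      simp [hZ, hF, List.append_assoc, List.replicate_succ, cons_zero_replicate_append]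
    · simp only [if_neg h0]
      rw [htake, List.count_append, List.filter_append]
      have hc : List.count 0 [l[j]] = 0 := by simp [h0]
      have hf : List.filter (fun v => v != 0) [l[j]] = [l[j]] := by simp [h0]
      rw [hc, hf, Nat.add_zero, hdrop]
      simp [hZ, hF, List.append_assoc]

lemma innerA_eq_colFix (l : List Int) : innerA l = colFix l := by
  rw [innerA, innerA_inv l l.length le_rfl]
  simp [colFix]

-- ===== VERDICT (by name: the statement is the Claim_ definition above) =====
theorem re_change_spec : Claim_equal_re_change := by
  intro graph _
  unfold Spec_re_change re_change re_change_alt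
  congr 1
  exact List.map_congr_left (fun l _ => innerA_eq_colFix l)
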